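-- pv_equiv track=rewrite | github.com/DashBing/Brainfuck | bf.py | preprocessor
-- ===== SOURCE A (Python) =====
-- annotator = "//"
--
-- def preprocessor(code:str) -> str:
--     code = code.replace("\r", "\n")
--     code = code.split("\n")
--     for i in range(len(code)):
--         code[i] = code[i].split(annotator)[0]
--     code = "".join(code)
--     code = code.replace(" ", "")
--     code = code.replace("\t", "")
--     return code
-- ===== SOURCE B (Python) =====
-- def preprocessor(code: str) -> str:
--     # single left-to-right scan with an in_comment flag; comment detection on original spacing
--     out = []
--     in_comment = False
--     n = len(code)
--     for i in range(n):
--         c = code[i]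
--         if c == '\n' or c == '\r':
--             in_comment = False
--         elif in_comment:
--             pass
--         elif c == '/' and i + 1 < n and code[i + 1] == '/':
--             in_comment = True
--         elif c == ' ' or c == '\t':
--             pass
--         else:
--             out.append(c)
--     return ''.join(out)
-- ===== Notes on version B (the rewrite author's own statement) =====
-- stated objective: alternative
-- what changed: Replaced A's multi-pass pipeline (replace CR, split into lines, cut each line at '//', join, then two more whole-string replaces for spaces and tabs) by a single left-to-right scan that keeps an in_comment flag, drops comment text and spaces/tabs on the fly, and detects '//' by a one-character lookahead on the original spacing.
import Mathlib
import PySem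

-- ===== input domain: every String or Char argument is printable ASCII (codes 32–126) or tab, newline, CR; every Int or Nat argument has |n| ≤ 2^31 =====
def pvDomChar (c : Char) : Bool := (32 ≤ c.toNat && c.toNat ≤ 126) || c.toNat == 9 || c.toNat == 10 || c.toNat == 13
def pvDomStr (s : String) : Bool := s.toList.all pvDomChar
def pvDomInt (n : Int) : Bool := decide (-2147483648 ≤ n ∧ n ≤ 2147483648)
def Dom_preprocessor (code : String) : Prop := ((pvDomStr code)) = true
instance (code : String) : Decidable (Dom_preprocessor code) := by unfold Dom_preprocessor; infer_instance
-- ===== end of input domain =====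

-- B replaces A's five whole-string passes (two replaces, two splits, a join, two more
-- replaces) by one left-to-right scan with an in_comment flag (objective: alternative).

-- ===== PORT A =====
-- A: replace '\r'→'\n', split on '\n', cut each line at "//", join, drop ' ' and '\t'.
def preprocessor (code : String) : String :=
  let code1 := PySem.Str.replace code "\r" "\n"
  -- code.split("\n"): separator is the nonempty literal "\n", so split? is `some`
  let lines := (PySem.Str.split? code1 "\n").getD []
  -- code[i].split(annotator)[0]: split's result is always nonempty, so [0] is headI
  let lines2 := lines.map (fun l => (((PySem.Str.split? l "//").getD []).headI))
  let joined := PySem.Str.join "" lines2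
  let s1 := PySem.Str.replace joined " " ""
  PySem.Str.replace s1 "\t" ""

-- ===== PORT B =====
-- B's loop: one scan, state = in_comment flag; lookahead code[i+1] is the tail's head.
def scanB (inComment : Bool) (cs : List Char) : List Char :=
  match cs with
  | [] => []
  | c :: t =>
    if c == '\n' || c == '\r' then scanB false t
    else if inComment then scanB inComment t
    else if c == '/' && (t.head? == some '/') then scanB true t
    else if c == ' ' || c == '\t' then scanB inComment t
    else c :: scanB inComment t

def preprocessor_alt (code : String) : String :=
  String.ofList (scanB false code.toList)

-- ===== PRECONDITION & SPEC =====
def Spec_preprocessor (code : String) (out : String) : Prop := out = preprocessor_alt code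
instance (code : String) (out : String) : Decidable (Spec_preprocessor code out) := by unfold Spec_preprocessor; infer_instance

-- ===== CLAIM (what is proved, stated in full; the proofs are below) =====
def Claim_equal_preprocessor : Prop := ∀ (code : String), Dom_preprocessor code → Spec_preprocessor code (preprocessor code)

-- ===== LEMMAS AND PROOFS =====

-- characterisation of Chars.replace for a one-character pattern
theorem replace_go_single (o : Char) (new : List Char) :
    ∀ (fuel : Nat) (l acc : List Char), l.length ≤ fuel →
      PySem.Chars.replace.go [o] new fuel l acc
        = acc.reverse ++ l.flatMap (fun c => if c = o then new else [c]) := by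
  intro fuel
  induction fuel with
  | zero =>
    intro l acc h
    have : l = [] := List.eq_nil_of_length_eq_zero (Nat.le_zero.mp h)
    subst this
    simp [PySem.Chars.replace.go]
  | succ n ih =>
    intro l acc h
    cases l with
    | nil => simp [PySem.Chars.replace.go]
    | cons c t =>
      rw [PySem.Chars.replace.go.eq_def]
      simp only [List.isPrefixOf]
      by_cases hc : c = o
      · subst hc
        simp only [beq_self_eq_true, Bool.true_and, if_pos]
        rw [ih _ _ (by simpa using Nat.le_of_succ_le_succ h)]
        simp
      · rw [if_neg (by
          simp only [Bool.and_eq_true, beq_iff_eq, not_and]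
          intro h' _
          exact hc h'.symm)]
        rw [ih _ _ (by simpa using Nat.le_of_succ_le_succ h)]
        simp [hc]

theorem replace_single (o : Char) (new s : List Char) :
    PySem.Chars.replace s [o] new = s.flatMap (fun c => if c = o then new else [c]) := by
  unfold PySem.Chars.replace
  rw [if_neg (by simp)]
  simpa using replace_go_single o new s.length s [] (Nat.le_refl _)

-- my reference splitter (sep nonempty in use)
def mySplit (sep : List Char) (l : List Char) : List (List Char) :=
  match l with
  | [] => [[]]
  | c :: t =>
    if sep ≠ [] ∧ sep.isPrefixOf (c :: t) then
      [] :: mySplit sep (List.drop sep.length (c :: t))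
    else
      List.modifyHead (c :: ·) (mySplit sep t)
termination_by l.length
decreasing_by
  · rename_i h
    simp only [List.length_drop, List.length_cons]
    have : 1 ≤ sep.length := by
      cases sep with
      | nil => exact absurd rfl h.1
      | cons a b => simp
    omega
  · simp

theorem mySplit_ne_nil (sep : List Char) (l : List Char) : mySplit sep l ≠ [] := by
  induction l with
  | nil => simp [mySplit]
  | cons c t ih =>
    rw [mySplit]
    split
    · simp
    · cases h : mySplit sep t with
      | nil => exact absurd h ih
      | cons a b => simp [h]

theorem splitOn_go_eq (sep : List Char) (hsep : sep ≠ []) :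
    ∀ (fuel : Nat) (l cur : List Char) (acc : List (List Char)), l.length ≤ fuel →
      PySem.Chars.splitOn.go sep fuel l cur acc
        = acc.reverse ++ List.modifyHead (cur.reverse ++ ·) (mySplit sep l) := by
  intro fuel
  induction fuel using Nat.strong_induction_on with
  | _ fuel ih =>
    intro l cur acc h
    match fuel, l with
    | 0, l =>
      have : l = [] := List.eq_nil_of_length_eq_zero (Nat.le_zero.mp h)
      subst this
      simp [PySem.Chars.splitOn.go, mySplit, List.modifyHead]
    | Nat.succ n, [] =>
      simp [PySem.Chars.splitOn.go, mySplit, List.modifyHead]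
    | Nat.succ n, c :: t =>
      rw [PySem.Chars.splitOn.go.eq_def]
      simp only []
      by_cases hp : sep.isPrefixOf (c :: t) = true
      · rw [if_pos hp]
        have hlen : (List.drop sep.length (c :: t)).length ≤ n := by
          have : 1 ≤ sep.length := by
            cases sep with
            | nil => exact absurd rfl hsep
            | cons a b => simp
          simp only [List.length_drop, List.length_cons]
          simp only [List.length_cons] at h
          omega
        rw [ih n (Nat.lt_succ_self n) _ _ _ hlen]
        rw [mySplit]
        rw [if_pos ⟨hsep, hp⟩]
        cases hms : mySplit sep (List.drop sep.length (c :: t)) with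
        | nil => exact absurd hms (mySplit_ne_nil sep _)
        | cons a b => simp [List.modifyHead, hms]
      · rw [if_neg hp]
        have hlen : t.length ≤ n := by simpa using Nat.le_of_succ_le_succ h
        rw [ih n (Nat.lt_succ_self n) _ _ _ hlen]
        rw [mySplit]
        rw [if_neg (by intro hh; exact hp hh.2)]
        cases hms : mySplit sep t with
        | nil => exact absurd hms (mySplit_ne_nil sep t)
        | cons hd tl => simp [List.modifyHead]

theorem splitOn_eq_mySplit (sep s : List Char) (hsep : sep ≠ []) :
    PySem.Chars.splitOn s sep = mySplit sep s := by
  unfold PySem.Chars.splitOn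
  rw [splitOn_go_eq sep hsep _ s [] [] (by omega)]
  cases h : mySplit sep s with
  | nil => exact absurd h (mySplit_ne_nil sep s)
  | cons hd tl => simp [List.modifyHead]

theorem isPrefixOf_single (a c : Char) (t : List Char) :
    List.isPrefixOf [a] (c :: t) = (a == c) := by
  simp [List.isPrefixOf]

-- the newline test
def isNL (c : Char) : Bool := c == '\n' || c == '\r'

-- split at newlines ('\n' or '\r'), the composite of A's replace + split
def splitNL : List Char → List (List Char)
  | [] => [[]]
  | c :: t => if isNL c then [] :: splitNL t else List.modifyHead (c :: ·) (splitNL t)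

theorem splitNL_ne_nil (l : List Char) : splitNL l ≠ [] := by
  induction l with
  | nil => simp [splitNL]
  | cons c t ih =>
    rw [splitNL]
    split
    · simp
    · cases h : splitNL t with
      | nil => exact absurd h ih
      | cons a b => simp [h]

theorem mySplit_newline_map (cs : List Char) :
    mySplit ['\n'] (cs.flatMap (fun c => if c = '\r' then ['\n'] else [c])) = splitNL cs := by
  induction cs with
  | nil => simp [mySplit, splitNL]
  | cons c t ih =>
    rw [List.flatMap_cons]
    by_cases hc : c = '\r'
    · subst hc
      rw [if_pos rfl, List.singleton_append, mySplit]
      rw [if_pos (by simp [List.isPrefixOf])]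
      simp only [List.length_cons, List.length_nil, List.drop_succ_cons, List.drop_zero]
      rw [ih]
      simp [splitNL, isNL]
    · rw [if_neg hc]
      by_cases hn : c = '\n'
      · subst hn
        rw [List.singleton_append, mySplit]
        rw [if_pos (by simp [List.isPrefixOf])]
        simp only [List.length_cons, List.length_nil, List.drop_succ_cons, List.drop_zero]
        rw [ih]
        simp [splitNL, isNL]
      · rw [List.singleton_append, mySplit]
        rw [if_neg (by
          rintro ⟨-, hpf⟩
          rw [isPrefixOf_single] at hpf
          exact hn (beq_iff_eq.mp hpf).symm)]
        rw [ih]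
        have : isNL c = false := by simp [isNL, hn, hc]
        rw [splitNL, if_neg (by simp [this])]

-- cut a line at the first "//"
def cutSlash : List Char → List Char
  | [] => []
  | c :: t => if List.isPrefixOf ['/', '/'] (c :: t) then [] else c :: cutSlash t

theorem headI_mySplit_slash (l : List Char) :
    (mySplit ['/', '/'] l).headI = cutSlash l := by
  induction l with
  | nil => simp [mySplit, cutSlash]
  | cons c t ih =>
    rw [mySplit, cutSlash]
    by_cases hp : List.isPrefixOf ['/', '/'] (c :: t) = true
    · rw [if_pos ⟨by simp, hp⟩, if_pos hp]
      simp
    · rw [if_neg (by intro hh; exact hp hh.2), if_neg hp]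
      cases h : mySplit ['/', '/'] t with
      | nil => exact absurd h (mySplit_ne_nil _ t)
      | cons hd tl =>
        rw [h] at ih
        simp [List.modifyHead, ← ih]

def keep (c : Char) : Bool := !(c == ' ') && !(c == '\t')

theorem intercalate_nil_flatten (L : List (List Char)) : List.intercalate [] L = L.flatten := by
  induction L with
  | nil => simp [List.intercalate]
  | cons a t ih =>
    cases t with
    | nil => simp [List.intercalate]
    | cons b u =>
      simp_all [List.intercalate, List.intersperse]

-- the target form of A's pipeline
def pipeA (cs : List Char) : List Char :=
  ((splitNL cs).map (fun l => (cutSlash l).filter keep)).flatten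

-- joint characterisation of B's scan
theorem scanB_eq_pipe (cs : List Char) :
    scanB false cs = pipeA cs ∧
    scanB true cs = (((splitNL cs).tail).map (fun l => (cutSlash l).filter keep)).flatten := by
  induction cs with
  | nil => simp [scanB, pipeA, splitNL, cutSlash]
  | cons c t ih =>
    obtain ⟨ihF, ihT⟩ := ih
    by_cases hnl : (c == '\n' || c == '\r') = true
    · constructor
      · rw [scanB]
        rw [if_pos hnl]
        rw [ihF]
        simp only [pipeA, splitNL]
        rw [if_pos (by simpa [isNL] using hnl)]
        simp [pipeA, cutSlash]
      · rw [scanB]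
        rw [if_pos hnl]
        rw [ihF]
        simp only [splitNL]
        rw [if_pos (by simpa [isNL] using hnl)]
        simp [pipeA]
    · have hnl' : isNL c = false := by simpa [isNL] using hnl
      have hsnl : splitNL (c :: t) = List.modifyHead (c :: ·) (splitNL t) := by
        simp [splitNL, hnl']
      obtain ⟨hd, tl, hht⟩ : ∃ hd tl, splitNL t = hd :: tl := by
        cases h : splitNL t with
        | nil => exact absurd h (splitNL_ne_nil t)
        | cons a b => exact ⟨a, b, rfl⟩
      have hcut : cutSlash (c :: hd) =
          if List.isPrefixOf ['/', '/'] (c :: hd) then [] else c :: cutSlash hd := rfl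
      -- the lookahead test in B agrees with the prefix test on the first line
      have hpre : List.isPrefixOf ['/', '/'] (c :: hd) = (c == '/' && (t.head? == some '/')) := by
        cases ht : t with
        | nil =>
          have : hd = [] := by
            rw [ht] at hht; simp [splitNL] at hht; exact hht.1
          subst this
          simp [List.isPrefixOf]
        | cons d t' =>
          by_cases hdnl : isNL d = true
          · have : hd = [] := by
              rw [ht] at hht
              simp only [splitNL, if_pos hdnl] at hht
              exact ((List.cons.injEq _ _ _ _).mp hht).1.symm
            subst this
            have : (d == '/') = false := by
              simp only [isNL] at hdnl
              rcases Bool.or_eq_true_iff.mp hdnl with h | h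
              · simp [beq_iff_eq] at h ⊢; simp [h]
              · simp [beq_iff_eq] at h ⊢; simp [h]
            simp [List.isPrefixOf, this]
          · have hdnl' : isNL d = false := by simpa using hdnl
            obtain ⟨hd', tl', hht'⟩ : ∃ hd' tl', splitNL t' = hd' :: tl' := by
              cases h : splitNL t' with
              | nil => exact absurd h (splitNL_ne_nil t')
              | cons a b => exact ⟨a, b, rfl⟩
            have : hd = d :: hd' := by
              rw [ht] at hht
              simp only [splitNL, hdnl', Bool.false_eq_true, if_false, hht', List.modifyHead] at hht
              exact ((List.cons.injEq _ _ _ _).mp hht).1.symm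
            subst this
            have e1 : ('/' == c) = (c == '/') := BEq.comm
            have e2 : ('/' == d) = (d == '/') := BEq.comm
            simp [List.isPrefixOf, e1, e2]
      constructor
      · rw [scanB]
        rw [if_neg (by simp [hnl]), if_neg Bool.false_ne_true]
        simp only [pipeA, hsnl, hht, List.modifyHead, List.map_cons, List.flatten_cons]
        by_cases hcm : (c == '/' && (t.head? == some '/')) = true
        · rw [if_pos hcm, ihT, hht]
          rw [hcut, hpre, if_pos hcm]
          simp
        · rw [if_neg hcm]
          rw [hcut, hpre, if_neg hcm]
          by_cases hsp : (c == ' ' || c == '\t') = true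
          · rw [if_pos hsp, ihF]
            have : keep c = false := by
              simp only [keep]
              rcases Bool.or_eq_true_iff.mp hsp with h | h <;> simp [h]
            simp [pipeA, hht, List.filter, this]
          · rw [if_neg hsp, ihF]
            have : keep c = true := by
              simp only [Bool.or_eq_true] at hsp
              have h1 : (c == ' ') = false := by
                cases hx : c == ' '
                · rfl
                · exact absurd (Or.inl hx) hsp
              have h2 : (c == '\t') = false := by
                cases hx : c == '\t'
                · rfl
                · exact absurd (Or.inr hx) hsp
              simp [keep, h1, h2]
            simp [pipeA, hht, List.filter, this]
      · rw [scanB]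
        rw [if_neg (by simp [hnl]), if_pos rfl]
        rw [ihT, hsnl, hht]
        simp [List.modifyHead]

-- A's pipeline, pushed down to pipeA
theorem filter_keep_split (l : List Char) :
    (l.filter (fun c => !(c == ' '))).filter (fun c => !(c == '\t')) = l.filter keep := by
  rw [List.filter_filter]
  apply List.filter_congr
  intro c _
  simp [keep, Bool.and_comm]

theorem preprocessor_eq_pipe (code : String) :
    (preprocessor code).toList = pipeA code.toList := by
  unfold preprocessor
  simp only [PySem.Str.replace, PySem.Str.split?, PySem.Str.join, PySem.Chars.split?,
    String.toList_ofList]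
  rw [show ("\r".toList) = ['\r'] from rfl, show ("\n".toList) = ['\n'] from rfl,
    show (" ".toList) = [' '] from rfl, show ("\t".toList) = ['\t'] from rfl,
    show ("//".toList) = ['/', '/'] from rfl,
    show ("".toList) = ([] : List Char) from rfl]
  rw [if_neg (by simp)]
  simp only [replace_single]
  have hspn : ∀ s : List Char, PySem.Chars.splitOn s ['\n'] = mySplit ['\n'] s :=
    fun s => splitOn_eq_mySplit _ s (by simp)
  simp only [hspn]
  rw [mySplit_newline_map]
  have hsp : ∀ s : List Char, PySem.Chars.splitOn s ['/', '/'] = mySplit ['/', '/'] s :=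
    fun s => splitOn_eq_mySplit _ s (by simp)
  have hhead : ∀ xs : List (List Char),
      (List.map String.ofList xs).headI = String.ofList xs.headI := by
    intro xs; cases xs <;> rfl
  simp only [Option.map_some, Option.getD_some, List.map_map, Function.comp_def,
    show (['/', '/'].isEmpty) = false from rfl, Bool.false_eq_true, if_false,
    String.toList_ofList, hsp, hhead, headI_mySplit_slash]
  unfold PySem.Chars.join
  rw [intercalate_nil_flatten]
  have h1 : ∀ l : List Char,
      l.flatMap (fun c => if c = ' ' then ([] : List Char) else [c]) = l.filter (fun c => !(c == ' ')) := by
    intro l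
    induction l with
    | nil => simp
    | cons c t ih =>
      by_cases h : c = ' '
      · simp [h, ih, List.filter]
      · have hb : (c == ' ') = false := by simp [h]
        simp [h, ih, List.filter, hb]
  have h2 : ∀ l : List Char,
      l.flatMap (fun c => if c = '\t' then ([] : List Char) else [c]) = l.filter (fun c => !(c == '\t')) := by
    intro l
    induction l with
    | nil => simp
    | cons c t ih =>
      by_cases h : c = '\t'
      · simp [h, ih, List.filter]
      · have hb : (c == '\t') = false := by simp [h]
        simp [h, ih, List.filter, hb]
  rw [h1, h2]
  rw [List.filter_flatten, List.filter_flatten]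
  unfold pipeA
  simp only [List.map_map]
  congr 1
  apply List.map_congr_left
  intro l _
  exact filter_keep_split (cutSlash l)

-- ===== VERDICT (by name: the statement is the Claim_ definition above) =====
theorem preprocessor_spec : Claim_equal_preprocessor := by
  intro code _
  unfold Spec_preprocessor preprocessor_alt
  have h := preprocessor_eq_pipe code
  have hb := (scanB_eq_pipe code.toList).1
  have : (preprocessor code).toList = scanB false code.toList := by rw [h, hb]
  calc preprocessor code = String.ofList (preprocessor code).toList := by
        rw [String.ofList_toList]
    _ = String.ofList (scanB false code.toList) := by rw [this]
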